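-- pv_equiv track=rewrite | github.com/smorawetz/Tensorflow-VQA | modified_HelperFunctionsandDataGeneration.py | ImportantZSites
-- ===== SOURCE A (Python) =====
-- def ImportantZSites(N):
--     """
--     Purpose:
--       - Generates the list of important lattice sites in order to compute the Z syndrome later on.
--
--     Arguments:
--       - N (odd integer): The number of qubits along one side of the square lattice.
--
--     Output:
--       - BoundaryListZ (list): A list of important sites along the boundary of the lattice.
--       - BulkListZ (list): A list of important sites in the bulk of the lattice.
--       - FullListZ (list): BoundaryListZ + BulkListZ, sorted numerically.
--     """
--
--     BoundaryP = (N - 1) // 2  # Number of boundary plaquettes per side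
--     BulkP = (N - 1) ** 2  # Number of bulk plaquettes
--
--     BoundaryListZ = []
--     BulkListZ = []
--
--     # The following loop creates a list of the important spins in the bulk for the RNN.
--
--     for i in range(N, N ** 2):  # Skips the first row to generate the important sites.
--         if (i % 2 != 0) and (i % N != 0):
--             BulkListZ.append(i)
--
--     # The next loop does the same, but for the boundaries.
--
--     for i in range(BoundaryP):
--         BoundaryListZ.append(1 + 2 * i)  # The top boundary
--         BoundaryListZ.append((N ** 2 - 1) - 2 * i)  # The bottom boundary
--
--     # Sort the boundary lists so we can locate which plaquette we're on
--
--     BoundaryListZ.sort()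
--
--     FullListZ = BoundaryListZ + BulkListZ
--     FullListZ.sort()
--
--     return BoundaryListZ, BulkListZ, FullListZ
-- ===== SOURCE B (Python) =====
-- def ImportantZSites(N):
--     BoundaryP = (N - 1) // 2
--     # boundary: top sites ascending, then bottom sites ascending (top < bottom, so
--     # the concatenation is already sorted -- no .sort() needed)
--     top = list(range(1, 1 + 2 * BoundaryP, 2))
--     bottom = list(range(N * N + 1 - 2 * BoundaryP, N * N, 2))
--     BoundaryListZ = top + bottom
--     # bulk: stride-2 walk over the odd numbers of [N, N^2), filtered on i % N != 0
--     start = N if N % 2 != 0 else N + 1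
--     BulkListZ = [i for i in range(start, N * N, 2) if i % N != 0]
--     # full: every top site precedes every bulk site, and only the short tail of the
--     # bulk interleaves with the bottom sites -- so concatenate top + bulk, cut the
--     # tail off at bottom[0] (binary search), and two-pointer merge it with bottom
--     FullListZ = top + BulkListZ
--     if bottom:
--         w = bottom[0]
--         lo = 0
--         hi = len(FullListZ)
--         while lo < hi:
--             mid = (lo + hi) // 2
--             if FullListZ[mid] < w:
--                 lo = mid + 1
--             else:
--                 hi = mid
--         tail = FullListZ[lo:]
--         del FullListZ[lo:]
--         i = 0
--         j = 0
--         while i < len(tail) and j < len(bottom):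
--             if tail[i] <= bottom[j]:
--                 FullListZ.append(tail[i])
--                 i += 1
--             else:
--                 FullListZ.append(bottom[j])
--                 j += 1
--         FullListZ.extend(tail[i:])
--         FullListZ.extend(bottom[j:])
--     return BoundaryListZ, BulkListZ, FullListZ
-- ===== Notes on version B (the rewrite author's own statement) =====
-- stated objective: alternative
-- what changed: B replaces A's flat odd/modulus scan over all N^2 sites and its two sorts by closed-form arithmetic ranges for the already-sorted boundary list, a stride-2 walk over just the odd sites for the bulk, and a binary-search splice of the few bottom sites into the tail of top+bulk instead of concat-and-sort for the full list.
import Mathlib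
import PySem

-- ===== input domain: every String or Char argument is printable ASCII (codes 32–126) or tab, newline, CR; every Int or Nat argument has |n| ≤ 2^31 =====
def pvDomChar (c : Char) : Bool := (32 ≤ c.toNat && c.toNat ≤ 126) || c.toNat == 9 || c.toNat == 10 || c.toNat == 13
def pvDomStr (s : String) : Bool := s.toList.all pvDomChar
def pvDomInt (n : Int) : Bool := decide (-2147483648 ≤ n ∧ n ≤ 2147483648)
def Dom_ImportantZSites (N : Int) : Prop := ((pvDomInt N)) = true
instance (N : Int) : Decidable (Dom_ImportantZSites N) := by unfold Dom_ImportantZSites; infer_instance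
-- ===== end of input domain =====

-- B replaces A's flat scan + two sorts by arithmetic ranges for the already-sorted
-- boundary, a stride-2 walk over the odd sites for the bulk, and a binary-search
-- splice of the bottom sites into top+bulk for the full list (objective: alternative
-- decomposition, same outputs).

-- ===== PORT A =====
def ImportantZSites (N : Int) : List Int × List Int × List Int :=
  let boundaryP := PySem.Int.floordiv (N - 1) 2
  let bulkListZ :=
    (PySem.List.pyRange N (N ^ 2) 1).foldl
      (fun acc i =>
        if (decide (PySem.Int.mod i 2 ≠ 0) && decide (PySem.Int.mod i N ≠ 0)) then acc ++ [i]
        else acc) []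
  let boundaryListZ :=
    (PySem.List.pyRange 0 boundaryP 1).foldl
      (fun acc i => (acc ++ [1 + 2 * i]) ++ [N ^ 2 - 1 - 2 * i]) []
  let boundaryListZ := PySem.List.sorted boundaryListZ (fun x => x)
  let fullListZ := PySem.List.sorted (boundaryListZ ++ bulkListZ) (fun x => x)
  (boundaryListZ, bulkListZ, fullListZ)

-- ===== PORT B =====
-- Source B's binary-search while loop (split point of the tail), as recursion on hi - lo
def pvFindSplit (xs : List Int) (w : Int) (lo hi : Nat) : Nat :=
  if lo < hi then
    if PySem.List.pyGetD xs (((lo + hi) / 2 : Nat) : Int) 0 < w then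
      pvFindSplit xs w ((lo + hi) / 2 + 1) hi
    else
      pvFindSplit xs w lo ((lo + hi) / 2)
  else lo
termination_by hi - lo
decreasing_by all_goals omega

-- Source B's two-pointer while loop (plus the trailing extends) as structural recursion
def pvMerge : List Int → List Int → List Int
  | [], ys => ys
  | x :: xs, [] => x :: xs
  | x :: xs, y :: ys =>
    if x ≤ y then x :: pvMerge xs (y :: ys) else y :: pvMerge (x :: xs) ys

-- Source B's 'if bottom:' splice block as a helper
def pvFullSplice (full0 bottom : List Int) : List Int :=
  match bottom with
  | [] => full0
  | w :: _ =>
    let lo := pvFindSplit full0 w 0 full0.length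
    full0.take lo ++ pvMerge (PySem.List.slice full0 (some (lo : Int)) none) bottom

def ImportantZSites_alt (N : Int) : List Int × List Int × List Int :=
  let boundaryP := PySem.Int.floordiv (N - 1) 2
  let top := PySem.List.pyRange 1 (1 + 2 * boundaryP) 2
  let bottom := PySem.List.pyRange (N * N + 1 - 2 * boundaryP) (N * N) 2
  let boundaryListZ := top ++ bottom
  let start := if PySem.Int.mod N 2 ≠ 0 then N else N + 1
  let bulkListZ :=
    (PySem.List.pyRange start (N * N) 2).filter (fun i => decide (PySem.Int.mod i N ≠ 0))
  let fullListZ := pvFullSplice (top ++ bulkListZ) bottom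
  (boundaryListZ, bulkListZ, fullListZ)

-- ===== PRECONDITION & SPEC =====
def Spec_ImportantZSites (N : Int) (out : List Int × List Int × List Int) : Prop := out = ImportantZSites_alt N
instance (N : Int) (out : List Int × List Int × List Int) : Decidable (Spec_ImportantZSites N out) := by unfold Spec_ImportantZSites; infer_instance

-- ===== CLAIM (what is proved, stated in full; the proofs are below) =====
def Claim_equal_ImportantZSites : Prop := ∀ (N : Int), Dom_ImportantZSites N → Spec_ImportantZSites N (ImportantZSites N)

-- ===== LEMMAS AND PROOFS =====

lemma pyRange_two_nil (a b : Int) (h : b ≤ a) : PySem.List.pyRange a b 2 = [] := by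
  rw [PySem.List.pyRange_of_pos _ _ (by norm_num)]
  simp [show ¬ a < b by omega]

lemma pyRange_two_cons (a b : Int) (h : a < b) :
    PySem.List.pyRange a b 2 = a :: PySem.List.pyRange (a + 2) b 2 := by
  rw [PySem.List.pyRange_of_pos _ _ (by norm_num), PySem.List.pyRange_of_pos _ _ (by norm_num)]
  by_cases h2 : a + 2 < b
  · have hn : ((b - a + 2 - 1) / 2).toNat = ((b - (a + 2) + 2 - 1) / 2).toNat + 1 := by omega
    simp only [if_pos h, if_pos h2, hn, List.range_succ_eq_map, List.map_cons, List.map_map]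
    congr 1
    · simp
    apply List.map_congr_left
    intro k _
    simp only [Function.comp_apply]
    push_cast
    ring
  · have hn : ((b - a + 2 - 1) / 2).toNat = 1 := by omega
    simp [if_pos h, if_neg h2, hn, List.range_succ]

lemma filter_odd_pyRange (b : Int) : ∀ (n : Nat) (a : Int), (b - a).toNat = n →
    (PySem.List.pyRange a b 1).filter (fun i => decide (PySem.Int.mod i 2 ≠ 0))
      = PySem.List.pyRange (if PySem.Int.mod a 2 ≠ 0 then a else a + 1) b 2 := by
  intro n
  induction n with
  | zero =>
    intro a hn
    have hba : b ≤ a := by omega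
    rw [PySem.List.pyRange_one_eq_nil hba]
    simp only [List.filter_nil]
    split_ifs <;> exact (pyRange_two_nil _ _ (by omega)).symm
  | succ n ih =>
    intro a hn
    have hab : a < b := by omega
    rw [PySem.List.pyRange_one_cons hab, List.filter_cons]
    have hmod : ∀ x : Int, PySem.Int.mod x 2 = x % 2 :=
      fun x => PySem.Int.mod_eq_emod_of_pos (by norm_num)
    rw [ih (a + 1) (by omega)]
    by_cases hodd : a % 2 = 0
    · have h2 : (a + 1) % 2 ≠ 0 := by omega
      simp [hodd, h2]
    · have h2 : (a + 1) % 2 = 0 := by omega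
      simp only [hmod]
      simp [hodd, h2]
      rw [pyRange_two_cons a b hab]
      have h3 : a + 1 + 1 = a + 2 := by ring
      rw [h3]

lemma bulk_eq (N : Int) :
    (PySem.List.pyRange N (N ^ 2) 1).foldl
      (fun acc i =>
        if (decide (PySem.Int.mod i 2 ≠ 0) && decide (PySem.Int.mod i N ≠ 0)) then acc ++ [i]
        else acc) []
    = (PySem.List.pyRange (if PySem.Int.mod N 2 ≠ 0 then N else N + 1) (N * N) 2).filter
        (fun i => decide (PySem.Int.mod i N ≠ 0)) := by
  rw [PySem.List.foldl_append_if
        (fun i => decide (PySem.Int.mod i 2 ≠ 0) && decide (PySem.Int.mod i N ≠ 0))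
        (fun i => i)]
  simp only [List.nil_append, List.map_id_fun', id_eq]
  have hcomm : (fun i => decide (PySem.Int.mod i 2 ≠ 0) && decide (PySem.Int.mod i N ≠ 0))
      = fun i => decide (PySem.Int.mod i N ≠ 0) && decide (PySem.Int.mod i 2 ≠ 0) := by
    funext i; exact Bool.and_comm _ _
  rw [hcomm, ← List.filter_filter,
      filter_odd_pyRange (N ^ 2) (N ^ 2 - N).toNat N rfl,
      show N ^ 2 = N * N from pow_two N]

lemma pyRange_two_map (a b : Int) :
    PySem.List.pyRange a b 2
      = (List.range (if a < b then ((b - a + 2 - 1) / 2).toNat else 0)).map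
          (fun (k : Nat) => a + 2 * (k : Int)) := by
  rw [PySem.List.pyRange_of_pos _ _ (by norm_num)]

lemma top_eq (B : Int) :
    PySem.List.pyRange 1 (1 + 2 * B) 2
      = (List.range B.toNat).map (fun (k : Nat) => 1 + 2 * (k : Int)) := by
  rw [pyRange_two_map]
  have h2 : (if 1 < 1 + 2 * B then ((1 + 2 * B - 1 + 2 - 1) / 2).toNat else 0) = B.toNat := by
    split_ifs <;> omega
  rw [h2]

lemma bottom_eq (m B : Int) :
    PySem.List.pyRange (m + 1 - 2 * B) m 2
      = (List.range B.toNat).map (fun (k : Nat) => m + 1 - 2 * B + 2 * (k : Int)) := by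
  rw [pyRange_two_map]
  have h2 : (if m + 1 - 2 * B < m then ((m - (m + 1 - 2 * B) + 2 - 1) / 2).toNat else 0) = B.toNat := by
    split_ifs <;> omega
  rw [h2]

lemma flatMap_pair_perm {α β : Type} (f g : α → β) (l : List α) :
    (l.flatMap (fun x => [f x] ++ [g x])).Perm (l.map f ++ l.map g) := by
  induction l with
  | nil => simp
  | cons x t ih =>
    simp only [List.flatMap_cons, List.map_cons, List.cons_append]
    refine List.Perm.cons _ ?_
    exact (ih.cons (g x)).trans List.perm_middle.symm

lemma key_ineq (N : Int) : 4 * PySem.Int.floordiv (N - 1) 2 ≤ N * N + 2 := by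
  rw [PySem.Int.floordiv_eq_ediv_of_pos (by norm_num : (0:Int) < 2)]
  have h1 : 2 * ((N - 1) / 2) ≤ N - 1 := by omega
  nlinarith [mul_self_nonneg (N - 1)]

lemma boundary_pairwise (N : Int) :
    (PySem.List.pyRange 1 (1 + 2 * PySem.Int.floordiv (N - 1) 2) 2
      ++ PySem.List.pyRange (N * N + 1 - 2 * PySem.Int.floordiv (N - 1) 2) (N * N) 2).Pairwise
      (· ≤ ·) := by
  rw [top_eq, bottom_eq]
  set B := PySem.Int.floordiv (N - 1) 2 with hB
  rw [List.pairwise_append]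
  refine ⟨?_, ?_, ?_⟩
  · exact (List.pairwise_map.mpr ((List.pairwise_lt_range).imp (fun h => by omega)))
  · exact (List.pairwise_map.mpr ((List.pairwise_lt_range).imp (fun h => by omega)))
  · intro x hx y hy
    obtain ⟨k, hk, rfl⟩ := List.mem_map.mp hx
    obtain ⟨j, hj, rfl⟩ := List.mem_map.mp hy
    rw [List.mem_range] at hk hj
    have h4 := key_ineq N
    rw [← hB] at h4
    have hkB : (k : Int) < B := by omega
    omega

lemma boundary_eq (N : Int) :
    PySem.List.sorted
      ((PySem.List.pyRange 0 (PySem.Int.floordiv (N - 1) 2) 1).foldl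
        (fun acc i => (acc ++ [1 + 2 * i]) ++ [N ^ 2 - 1 - 2 * i]) []) (fun x => x)
    = PySem.List.pyRange 1 (1 + 2 * PySem.Int.floordiv (N - 1) 2) 2
      ++ PySem.List.pyRange (N * N + 1 - 2 * PySem.Int.floordiv (N - 1) 2) (N * N) 2 := by
  have hbody : (fun (acc : List Int) i => (acc ++ [1 + 2 * i]) ++ [N ^ 2 - 1 - 2 * i])
      = fun acc i => acc ++ ([1 + 2 * i] ++ [N ^ 2 - 1 - 2 * i]) := by
    funext acc i; simp
  rw [hbody, PySem.List.foldl_append_eq_flatMap, List.nil_append]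
  apply PySem.List.sorted_id_eq_of_perm_of_pairwise
  · -- permutation
    set B := PySem.Int.floordiv (N - 1) 2 with hB
    rw [PySem.List.pyRange_one]
    simp only [zero_add, Int.sub_zero]
    rw [List.flatMap_map, top_eq, bottom_eq]
    have hrev : (List.range B.toNat).map (fun (k : Nat) => N * N + 1 - 2 * B + 2 * (k : Int))
        = ((List.range B.toNat).map (fun (k : Nat) => N ^ 2 - 1 - 2 * (k : Int))).reverse := by
      apply List.ext_getElem
      · simp
      · intro j h1 h2
        simp only [List.getElem_map, List.getElem_reverse, List.getElem_range,
          List.length_map, List.length_range, List.length_reverse] at h1 h2 ⊢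
        have hm : N ^ 2 = N * N := pow_two N
        rw [hm]
        have : (B.toNat : Int) = B := by omega
        omega
    rw [hrev]
    refine List.Perm.trans (List.Perm.append_left _ (List.reverse_perm _)) ?_
    exact (flatMap_pair_perm (fun k : Nat => 1 + 2 * (k : Int))
      (fun k : Nat => N ^ 2 - 1 - 2 * (k : Int)) (List.range B.toNat)).symm
  · exact boundary_pairwise N

lemma pyRange_two_pairwise (a b : Int) : (PySem.List.pyRange a b 2).Pairwise (· < ·) := by
  rw [pyRange_two_map]
  exact List.pairwise_map.mpr ((List.pairwise_lt_range).imp (fun h => by omega))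

lemma pvMerge_eq_merge (xs ys : List Int) :
    pvMerge xs ys = xs.merge ys (fun a b => decide (a ≤ b)) := by
  fun_induction pvMerge xs ys <;> simp_all

lemma pvFindSplit_spec (xs : List Int) (w : Int) (hs : xs.Pairwise (· ≤ ·)) :
    ∀ (fuel lo hi : Nat), hi - lo ≤ fuel → lo ≤ hi → hi ≤ xs.length →
    (∀ j (hj : j < xs.length), j < lo → xs[j] < w) →
    (∀ j (hj : j < xs.length), hi ≤ j → w ≤ xs[j]) →
    lo ≤ pvFindSplit xs w lo hi ∧ pvFindSplit xs w lo hi ≤ hi ∧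
      (∀ j (hj : j < xs.length), j < pvFindSplit xs w lo hi → xs[j] < w) ∧
      (∀ j (hj : j < xs.length), pvFindSplit xs w lo hi ≤ j → w ≤ xs[j]) := by
  have mono : ∀ i j (h1 : i < xs.length) (h2 : j < xs.length), i ≤ j → xs[i] ≤ xs[j] := by
    intro i j h1 h2 hij
    rcases Nat.lt_or_ge i j with h | h
    · exact List.pairwise_iff_getElem.mp hs i j h1 h2 h
    · have hij' : i = j := by omega
      subst hij'; exact le_rfl
  intro fuel
  induction fuel with
  | zero =>
    intro lo hi hfuel hlh hhl hlow hup
    have heq : lo = hi := by omega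
    rw [pvFindSplit, if_neg (by omega)]
    exact ⟨le_rfl, by omega, hlow, by rw [heq]; exact hup⟩
  | succ n ih =>
    intro lo hi hfuel hlh hhl hlow hup
    by_cases hlt : lo < hi
    · rw [pvFindSplit, if_pos hlt]
      have hmidlt : (lo + hi) / 2 < xs.length := by omega
      rw [PySem.List.pyGetD_natCast, List.getD_eq_getElem _ _ hmidlt]
      by_cases hv : xs[(lo + hi) / 2] < w
      · rw [if_pos hv]
        refine (ih ((lo + hi) / 2 + 1) hi (by omega) (by omega) hhl ?_ hup).imp
          (fun h => by omega) (fun h => h)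
        intro j hj hjlt
        exact lt_of_le_of_lt (mono j ((lo + hi) / 2) hj hmidlt (by omega)) hv
      · rw [if_neg hv]
        refine (ih lo ((lo + hi) / 2) (by omega) (by omega) (by omega) hlow ?_).imp
          (fun h => h) (fun h => ⟨by omega, h.2⟩)
        intro j hj hjge
        exact le_trans (not_lt.mp hv) (mono ((lo + hi) / 2) j hmidlt hj hjge)
    · rw [pvFindSplit, if_neg hlt]
      have heq : lo = hi := by omega
      exact ⟨le_rfl, by omega, hlow, by rw [heq]; exact hup⟩

lemma full_splice_eq (top bottom bulk : List Int)
    (htb : (top ++ bulk).Pairwise (· ≤ ·)) (hbot : bottom.Pairwise (· ≤ ·)) :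
    PySem.List.sorted ((top ++ bottom) ++ bulk) (fun x => x)
      = pvFullSplice (top ++ bulk) bottom := by
  unfold pvFullSplice
  rcases bottom with _ | ⟨w, bt⟩
  · simp only [List.append_nil]
    exact PySem.List.sorted_id_eq_of_perm_of_pairwise _ _ (List.Perm.refl _) htb
  · simp only [PySem.List.slice_from_natCast]
    set full0 := top ++ bulk with hfull0
    set r := pvFindSplit full0 w 0 full0.length with hr
    obtain ⟨-, hrle, hlow, hup⟩ :=
      pvFindSplit_spec full0 w htb full0.length 0 full0.length (by omega) (by omega) le_rfl
        (fun j hj h => absurd h (by omega)) (fun j hj h => absurd h (by omega))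
    apply PySem.List.sorted_id_eq_of_perm_of_pairwise
    · -- permutation
      refine List.Perm.trans
        (List.Perm.append_left _ ((pvMerge_eq_merge _ _) ▸ List.merge_perm_append _)) ?_
      rw [← List.append_assoc, List.take_append_drop]
      rw [hfull0, List.append_assoc, List.append_assoc]
      exact List.Perm.append_left top (List.perm_append_comm)
    · -- sortedness
      rw [List.pairwise_append]
      refine ⟨List.Pairwise.sublist (List.take_sublist _ _) htb, ?_, ?_⟩
      · rw [pvMerge_eq_merge]
        exact (List.Pairwise.sublist (List.drop_sublist _ _) htb).merge hbot
      · intro x hx y hy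
        obtain ⟨j, hj, rfl⟩ := List.mem_take_iff_getElem.mp hx
        have hxw : full0[j] < w := hlow j (by omega) (by omega)
        have hwr : w ≤ y := by
          rw [pvMerge_eq_merge, List.mem_merge] at hy
          rcases hy with hy | hy
          · obtain ⟨k, hk, rfl⟩ := List.mem_iff_getElem.mp hy
            have hk' : r + k < full0.length := by
              simp only [List.length_drop] at hk; omega
            rw [List.getElem_drop]
            exact hup (r + k) hk' (by omega)
          · rcases List.mem_cons.mp hy with rfl | hy
            · exact le_rfl
            · exact (List.pairwise_cons.mp hbot).1 y hy
        exact le_of_lt (lt_of_lt_of_le hxw hwr)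

lemma start_le_of_mem_bulk (N x : Int)
    (hx : x ∈ (PySem.List.pyRange (if PySem.Int.mod N 2 ≠ 0 then N else N + 1) (N * N) 2).filter
      (fun i => decide (PySem.Int.mod i N ≠ 0))) :
    N ≤ x := by
  have hx' := List.mem_of_mem_filter hx
  rw [pyRange_two_map] at hx'
  obtain ⟨k, hk, rfl⟩ := List.mem_map.mp hx'
  split_ifs <;> omega

lemma top_bulk_pairwise (N : Int) :
    (PySem.List.pyRange 1 (1 + 2 * PySem.Int.floordiv (N - 1) 2) 2
      ++ (PySem.List.pyRange (if PySem.Int.mod N 2 ≠ 0 then N else N + 1) (N * N) 2).filter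
          (fun i => decide (PySem.Int.mod i N ≠ 0))).Pairwise (· ≤ ·) := by
  rw [List.pairwise_append]
  refine ⟨top_eq _ ▸ (List.pairwise_map.mpr ((List.pairwise_lt_range).imp (fun h => by omega))),
    ((pyRange_two_pairwise _ _).filter _).imp (fun h => le_of_lt h), ?_⟩
  intro x hx y hy
  have hyN := start_le_of_mem_bulk N y hy
  rw [top_eq] at hx
  obtain ⟨k, hk, rfl⟩ := List.mem_map.mp hx
  rw [List.mem_range] at hk
  have hB : PySem.Int.floordiv (N - 1) 2 = (N - 1) / 2 :=
    PySem.Int.floordiv_eq_ediv_of_pos (by norm_num)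
  rw [hB] at hk
  have : (k : Int) < (N - 1) / 2 := by omega
  omega

-- ===== VERDICT (by name: the statement is the Claim_ definition above) =====
theorem ImportantZSites_spec : Claim_equal_ImportantZSites := by
  intro N _
  show ImportantZSites N = ImportantZSites_alt N
  unfold ImportantZSites ImportantZSites_alt
  simp only [Prod.mk.injEq]
  refine ⟨boundary_eq N, bulk_eq N, ?_⟩
  rw [boundary_eq N, bulk_eq N]
  exact full_splice_eq _ _ _ (top_bulk_pairwise N) ((pyRange_two_pairwise _ _).imp (fun h => le_of_lt h))
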